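-- pv_equiv track=rewrite | github.com/twotimeessgeo/auto-analysis | split_exam_questions.py | grouped_true_runs
-- ===== SOURCE A (Python) =====
-- from typing import Iterable
--
-- def grouped_true_runs(values: Iterable[bool], max_gap: int = 0) -> list[tuple[int, int]]:
--     groups: list[tuple[int, int]] = []
--     start: int | None = None
--     last_true: int | None = None
--     gap = 0
--
--     for idx, value in enumerate(values):
--         if value:
--             if start is None:
--                 start = idx
--             last_true = idx
--             gap = 0
--         elif start is not None:
--             gap += 1
--             if gap > max_gap:
--                 assert last_true is not None
--                 groups.append((start, last_true))
--                 start = None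
--                 last_true = None
--                 gap = 0
--
--     if start is not None and last_true is not None:
--         groups.append((start, last_true))
--     return groups
-- ===== SOURCE B (Python) =====
-- def grouped_true_runs(values, max_gap=0):
--     trues = [i for i, v in enumerate(values) if v]
--     # maximal runs of consecutive True indices
--     runs = []
--     for i in trues:
--         if runs and i == runs[-1][1] + 1:
--             runs[-1] = (runs[-1][0], i)
--         else:
--             runs.append((i, i))
--     # merge runs separated by at most max_gap False values
--     merged = []
--     for s, e in runs:
--         if merged and s - merged[-1][1] - 1 <= max_gap:
--             merged[-1] = (merged[-1][0], e)
--         else: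
--             merged.append((s, e))
--     return merged
-- ===== Notes on version B (the rewrite author's own statement) =====
-- stated objective: alternative
-- what changed: B is a three-stage pipeline: extract the True indices with a comprehension, group them into maximal runs of consecutive indices, then merge runs separated by at most max_gap Falses, instead of A's single stateful scan with start/last_true/gap bookkeeping over every element.
import Mathlib
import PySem

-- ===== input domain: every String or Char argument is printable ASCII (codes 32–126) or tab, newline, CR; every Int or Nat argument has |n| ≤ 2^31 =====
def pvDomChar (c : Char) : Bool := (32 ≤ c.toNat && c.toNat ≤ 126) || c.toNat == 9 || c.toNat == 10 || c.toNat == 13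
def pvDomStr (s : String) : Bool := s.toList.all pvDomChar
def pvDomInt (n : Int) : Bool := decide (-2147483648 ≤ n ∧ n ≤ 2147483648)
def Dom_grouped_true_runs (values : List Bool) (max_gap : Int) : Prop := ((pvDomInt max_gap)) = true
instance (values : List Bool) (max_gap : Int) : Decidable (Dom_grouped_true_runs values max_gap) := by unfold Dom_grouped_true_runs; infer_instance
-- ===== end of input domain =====

-- B rebuilds the result as a pipeline (True indices → maximal consecutive runs → merge runs with gap ≤ max_gap) instead of A's single stateful scan; same O(n) cost (objective: alternative).

-- ===== PORT A =====
-- the for-loop over enumerate(values), as structural recursion carrying the index and the loop state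
def goA (max_gap : Int) : List Bool → Nat → List (Int × Int) → Option Int → Option Int → Int → List (Int × Int)
  | [], _, groups, start, last_true, _ =>
      -- trailing 'if start is not None and last_true is not None'
      match start, last_true with
      | some s, some l => groups ++ [(s, l)]
      | _, _ => groups
  | v :: vs, idx, groups, start, last_true, gap =>
      if v then
        goA max_gap vs (idx + 1) groups (if start.isNone then some (idx : Int) else start) (some (idx : Int)) 0
      else if start.isSome then
        if gap + 1 > max_gap then
          goA max_gap vs (idx + 1) (groups ++ [(start.getD 0, last_true.getD 0)]) none none 0
        else
          goA max_gap vs (idx + 1) groups start last_true (gap + 1)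
      else
        goA max_gap vs (idx + 1) groups start last_true gap

def grouped_true_runs (values : List Bool) (max_gap : Int) : List (Int × Int) :=
  goA max_gap values 0 [] none none 0

-- ===== PORT B =====
-- the comprehension [i for i, v in enumerate(values) if v], as recursion carrying the index
def truesB : List Bool → Nat → List Int
  | [], _ => []
  | v :: vs, idx => if v then (idx : Int) :: truesB vs (idx + 1) else truesB vs (idx + 1)

-- the 'runs' loop: extend the last run in place ('runs[-1] = (runs[-1][0], i)') or append a fresh one
def runsB : List Int → List (Int × Int) → List (Int × Int)
  | [], acc => acc
  | i :: rest, acc =>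
      match acc.getLast? with
      | some (s, e) =>
          if i = e + 1 then runsB rest (acc.dropLast ++ [(s, i)])
          else runsB rest (acc ++ [(i, i)])
      | none => runsB rest (acc ++ [(i, i)])

-- the 'merged' loop: absorb a run into the last merged group or append it
def mergeB (max_gap : Int) : List (Int × Int) → List (Int × Int) → List (Int × Int)
  | [], acc => acc
  | (s, e) :: rest, acc =>
      match acc.getLast? with
      | some (ms, me) =>
          if s - me - 1 ≤ max_gap then mergeB max_gap rest (acc.dropLast ++ [(ms, e)])
          else mergeB max_gap rest (acc ++ [(s, e)])
      | none => mergeB max_gap rest (acc ++ [(s, e)])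

def grouped_true_runs_alt (values : List Bool) (max_gap : Int) : List (Int × Int) :=
  mergeB max_gap (runsB (truesB values 0) []) []

-- ===== PRECONDITION & SPEC =====
def Spec_grouped_true_runs (values : List Bool) (max_gap : Int) (out : List (Int × Int)) : Prop := out = grouped_true_runs_alt values max_gap
instance (values : List Bool) (max_gap : Int) (out : List (Int × Int)) : Decidable (Spec_grouped_true_runs values max_gap out) := by unfold Spec_grouped_true_runs; infer_instance

-- ===== CLAIM (what is proved, stated in full; the proofs are below) =====
def Claim_equal_grouped_true_runs : Prop := ∀ (values : List Bool) (max_gap : Int), Dom_grouped_true_runs values max_gap → Spec_grouped_true_runs values max_gap (grouped_true_runs values max_gap)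

-- ===== LEMMAS AND PROOFS =====

-- A's split of the trues list, accumulator style (intermediate form for the proof; this is
-- what goA computes on the list of True indices)
def goC (max_gap : Int) : List Int → List (Int × Int) → Int → Int → List (Int × Int)
  | [], groups, start, prev => groups ++ [(start, prev)]
  | j :: rest, groups, start, prev =>
      if j - prev - 1 > max_gap ∧ j - prev > 1 then
        goC max_gap rest (groups ++ [(start, prev)]) j j
      else
        goC max_gap rest groups start j

-- the same, cons style
def goCk (max_gap : Int) : List Int → Int → Int → List (Int × Int)
  | [], s, p => [(s, p)]
  | j :: rest, s, p =>
      if j - p - 1 > max_gap ∧ j - p > 1 then (s, p) :: goCk max_gap rest j j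
      else goCk max_gap rest s j

def runsAux : List Int → Int → Int → List (Int × Int)
  | [], s, e => [(s, e)]
  | j :: rest, s, e =>
      if j = e + 1 then runsAux rest s j else (s, e) :: runsAux rest j j

def mergeAux (max_gap : Int) : List (Int × Int) → Int → Int → List (Int × Int)
  | [], ms, me => [(ms, me)]
  | (s, e) :: rest, ms, me =>
      if s - me - 1 ≤ max_gap then mergeAux max_gap rest ms e
      else (ms, me) :: mergeAux max_gap rest s e

def mergeStep (max_gap : Int) (rs : List (Int × Int)) (ms : Int) : List (Int × Int) :=
  match rs with
  | [] => []
  | (_, e) :: rr => mergeAux max_gap rr ms e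

theorem truesB_ge (vs : List Bool) (idx : Nat) :
    ∀ j ∈ truesB vs idx, (idx : Int) ≤ j := by
  induction vs generalizing idx with
  | nil => simp [truesB]
  | cons v vs ih =>
    intro j hj
    cases v <;> simp only [truesB, Bool.false_eq_true, if_false, if_true] at hj
    · have := ih (idx + 1) j hj; push_cast at this ⊢; omega
    · rw [List.mem_cons] at hj
      rcases hj with h | h
      · omega
      · have := ih (idx + 1) j h; push_cast at this ⊢; omega

theorem truesB_chain (vs : List Bool) (idx : Nat) :
    List.IsChain (· < ·) (truesB vs idx) := by
  induction vs generalizing idx with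
  | nil => simp [truesB]
  | cons v vs ih =>
    cases v <;> simp only [truesB, Bool.false_eq_true, if_false, if_true]
    · exact ih (idx + 1)
    · refine (ih (idx + 1)).cons ?_
      intro y hy
      have hmem : y ∈ truesB vs (idx + 1) := List.mem_of_mem_head? hy
      have := truesB_ge vs (idx + 1) y hmem
      push_cast at this; omega

theorem runs_acc (ts : List Int) (acc : List (Int × Int)) (s e : Int) :
    runsB ts (acc ++ [(s, e)]) = acc ++ runsAux ts s e := by
  induction ts generalizing acc s e with
  | nil => simp [runsB, runsAux]
  | cons j rest ih =>
    simp only [runsB, runsAux, List.getLast?_concat, List.dropLast_concat]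
    by_cases h : j = e + 1
    · rw [if_pos h, if_pos h, ih]
    · rw [if_neg h, if_neg h, ih (acc ++ [(s, e)]) j j,
        List.append_assoc, List.singleton_append]

theorem merge_acc (mg : Int) (rs : List (Int × Int)) (acc : List (Int × Int)) (ms me : Int) :
    mergeB mg rs (acc ++ [(ms, me)]) = acc ++ mergeAux mg rs ms me := by
  induction rs generalizing acc ms me with
  | nil => simp [mergeB, mergeAux]
  | cons p rest ih =>
    obtain ⟨s, e⟩ := p
    simp only [mergeB, mergeAux, List.getLast?_concat, List.dropLast_concat]
    by_cases h : s - me - 1 ≤ mg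
    · rw [if_pos h, if_pos h, ih]
    · rw [if_neg h, if_neg h, ih (acc ++ [(ms, me)]) s e,
        List.append_assoc, List.singleton_append]

theorem runsAux_shape (ts : List Int) (s e : Int) :
    ∃ E rr, runsAux ts s e = (s, E) :: rr := by
  induction ts generalizing s e with
  | nil => exact ⟨e, [], rfl⟩
  | cons j rest ih =>
    simp only [runsAux]
    split
    · exact ih s j
    · exact ⟨e, runsAux rest j j, rfl⟩

-- the fused runs+merge pipeline computes the gap-split of the trues list
theorem pipeline_eq (mg : Int) (ts : List Int) : ∀ (s e ms : Int),
    List.IsChain (· < ·) (e :: ts) →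
    mergeStep mg (runsAux ts s e) ms = goCk mg ts ms e := by
  induction ts with
  | nil => intro s e ms _; simp [runsAux, mergeStep, mergeAux, goCk]
  | cons j rest ih =>
    intro s e ms hch
    rw [List.isChain_cons_cons] at hch
    obtain ⟨hej, hch⟩ := hch
    by_cases hje : j = e + 1
    · have hcond : ¬ (j - e - 1 > mg ∧ j - e > 1) := by omega
      simp only [runsAux, goCk, if_pos hje, if_neg hcond]
      exact ih s j ms hch
    · have hge : j - e > 1 := by omega
      obtain ⟨E, rr, hE⟩ := runsAux_shape rest j j
      simp only [runsAux, if_neg hje, mergeStep, hE, mergeAux, goCk]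
      by_cases hsplit : j - e - 1 ≤ mg
      · rw [if_pos hsplit, if_neg (by omega)]
        have := ih j j ms hch
        rw [hE] at this
        simp only [mergeStep] at this
        exact this
      · rw [if_neg hsplit, if_pos ⟨by omega, hge⟩]
        have := ih j j j hch
        rw [hE] at this
        simp only [mergeStep] at this
        rw [this]

theorem goC_acc (max_gap : Int) (ts : List Int) (G H : List (Int × Int)) (s p : Int) :
    goC max_gap ts (G ++ H) s p = G ++ goC max_gap ts H s p := by
  induction ts generalizing G H s p with
  | nil => simp [goC]
  | cons j rest ih =>
    simp only [goC]
    split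
    · rw [List.append_assoc]; exact ih _ _ _ _
    · exact ih _ _ _ _

theorem goC_eq_goCk (max_gap : Int) (ts : List Int) (G : List (Int × Int)) (s p : Int) :
    goC max_gap ts G s p = G ++ goCk max_gap ts s p := by
  induction ts generalizing G s p with
  | nil => simp [goC, goCk]
  | cons j rest ih =>
    simp only [goC, goCk]
    split
    · rw [ih, List.append_assoc]; simp
    · exact ih _ _ _

-- joint invariant: the idle state (start = none) and the active state (start = some s, last = some l,
-- gap = idx - l - 1 with gap ≤ max_gap or gap = 0) both reduce to the gap-split of truesB
theorem goA_goC (max_gap : Int) (vs : List Bool) : ∀ (idx : Nat),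
    (∀ (G : List (Int × Int)) (gap : Int),
      goA max_gap vs idx G none none gap =
        G ++ (match truesB vs idx with
              | [] => []
              | t :: rest => goC max_gap rest [] t t)) ∧
    (∀ (G : List (Int × Int)) (s l : Int),
      l < (idx : Int) →
      ((idx : Int) - l - 1 ≤ max_gap ∨ (idx : Int) - l - 1 = 0) →
      goA max_gap vs idx G (some s) (some l) ((idx : Int) - l - 1) =
        G ++ goC max_gap (truesB vs idx) [] s l) := by
  induction vs with
  | nil =>
    intro idx
    refine ⟨fun G gap => by simp [goA, truesB], fun G s l _ _ => by simp [goA, goC, truesB]⟩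
  | cons v vs ih =>
    intro idx
    constructor
    · intro G gap
      cases v
      · simp only [goA, truesB, Bool.false_eq_true, if_false, Option.isSome_none]
        exact (ih (idx + 1)).1 G gap
      · simp only [goA, truesB, if_true, Option.isNone_none]
        have hact := (ih (idx + 1)).2 G (idx : Int) (idx : Int) (by push_cast; omega)
        have he : ((idx + 1 : Nat) : Int) - (idx : Int) - 1 = 0 := by push_cast; omega
        rw [he] at hact
        exact hact (Or.inr rfl)
    · intro G s l hl hg
      cases v
      · simp only [goA, truesB, Bool.false_eq_true, if_false, Option.isSome_some, if_true]
        by_cases hcl : (idx : Int) - l - 1 + 1 > max_gap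
        · rw [if_pos hcl]
          simp only [Option.getD_some]
          rw [(ih (idx + 1)).1 (G ++ [(s, l)]) 0]
          cases hts : truesB vs (idx + 1) with
          | nil => simp [goC]
          | cons t rest =>
            have ht : ((idx + 1 : Nat) : Int) ≤ t :=
              truesB_ge vs (idx + 1) t (by rw [hts]; exact List.mem_cons_self ..)
            push_cast at ht
            simp only [goC]
            rw [if_pos ⟨by omega, by omega⟩]
            rw [show ([] : List (Int × Int)) ++ [(s, l)] = [(s, l)] ++ ([] : List (Int × Int)) from by simp,
              goC_acc]
            simp
        · rw [if_neg hcl]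
          have hact := (ih (idx + 1)).2 G s l (by push_cast; omega)
          have he : ((idx + 1 : Nat) : Int) - l - 1 = (idx : Int) - l - 1 + 1 := by
            push_cast; omega
          rw [he] at hact
          exact hact (Or.inl (by omega))
      · simp only [goA, truesB, if_true, Option.isNone_some, Bool.false_eq_true, if_false]
        have hact := (ih (idx + 1)).2 G s (idx : Int) (by push_cast; omega)
        have he : ((idx + 1 : Nat) : Int) - (idx : Int) - 1 = 0 := by push_cast; omega
        rw [he] at hact
        rw [hact (Or.inr rfl)]
        simp only [goC]
        rw [if_neg (by rintro ⟨h1, h2⟩; rcases hg with h | h <;> omega)]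

-- ===== VERDICT (by name: the statement is the Claim_ definition above) =====
theorem grouped_true_runs_spec : Claim_equal_grouped_true_runs := by
  intro values max_gap _
  show grouped_true_runs values max_gap = grouped_true_runs_alt values max_gap
  unfold grouped_true_runs grouped_true_runs_alt
  rw [(goA_goC max_gap values 0).1 [] 0]
  cases hts : truesB values 0 with
  | nil => simp [runsB, mergeB]
  | cons t rest =>
    have hch : List.IsChain (· < ·) (t :: rest) := by
      have := truesB_chain values 0
      rw [hts] at this
      exact this
    simp only [List.nil_append]
    rw [goC_eq_goCk]
    simp only [List.nil_append]
    have h1 : runsB (t :: rest) [] = runsAux rest t t := by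
      simp only [runsB, List.getLast?_nil]
      have := runs_acc rest [] t t
      simpa using this
    rw [h1]
    obtain ⟨E, rr, hE⟩ := runsAux_shape rest t t
    rw [hE]
    have h2 : mergeB max_gap ((t, E) :: rr) [] = mergeAux max_gap rr t E := by
      simp only [mergeB, List.getLast?_nil]
      have := merge_acc max_gap rr [] t E
      simpa using this
    rw [h2]
    have := pipeline_eq max_gap rest t t t hch
    rw [hE] at this
    exact this.symm
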